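-- pv_equiv track=rewrite | github.com/Runa-Rameena/KDSH-Powerhouse- | pipeline/metrics_genai_disagreements.py | overall_heuristic_label
-- ===== SOURCE A (Python) =====
-- def overall_heuristic_label(heuristic_hits):
--     """Derive an overall heuristic label from per-hit heuristic labels.
--     Priority: CONTRADICTS > SUPPORTS > NEUTRAL
--     Returns None if no heuristic labels present.
--     """
--     labels = [h.get('heuristic_label') for h in (heuristic_hits or []) if h.get('heuristic_label')]
--     labels = [l.upper() for l in labels]
--     if any(l == 'CONTRADICTS' for l in labels):
--         return 'CONTRADICTS'
--     if any(l == 'SUPPORTS' for l in labels):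
--         return 'SUPPORTS'
--     if labels:
--         return 'NEUTRAL'
--     return None
-- ===== SOURCE B (Python) =====
-- def overall_heuristic_label(heuristic_hits):
--     """Single-pass numeric-max priority resolution instead of three any() scans."""
--     ranks = {'CONTRADICTS': 2, 'SUPPORTS': 1}
--     best = -1
--     for h in (heuristic_hits or []):
--         l = h.get('heuristic_label')
--         if l:
--             best = max(best, ranks.get(l.upper(), 0))
--     if best == 2:
--         return 'CONTRADICTS'
--     if best == 1:
--         return 'SUPPORTS'
--     if best == 0:
--         return 'NEUTRAL'
--     return None
-- ===== Notes on version B (the rewrite author's own statement) =====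
-- stated objective: alternative
-- what changed: Replaces the build-list-then-three-sequential-any() priority scans by a single fold that keeps the maximum numeric rank (CONTRADICTS=2, SUPPORTS=1, other=0, none seen=-1) and decodes it at the end.
import Mathlib
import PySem

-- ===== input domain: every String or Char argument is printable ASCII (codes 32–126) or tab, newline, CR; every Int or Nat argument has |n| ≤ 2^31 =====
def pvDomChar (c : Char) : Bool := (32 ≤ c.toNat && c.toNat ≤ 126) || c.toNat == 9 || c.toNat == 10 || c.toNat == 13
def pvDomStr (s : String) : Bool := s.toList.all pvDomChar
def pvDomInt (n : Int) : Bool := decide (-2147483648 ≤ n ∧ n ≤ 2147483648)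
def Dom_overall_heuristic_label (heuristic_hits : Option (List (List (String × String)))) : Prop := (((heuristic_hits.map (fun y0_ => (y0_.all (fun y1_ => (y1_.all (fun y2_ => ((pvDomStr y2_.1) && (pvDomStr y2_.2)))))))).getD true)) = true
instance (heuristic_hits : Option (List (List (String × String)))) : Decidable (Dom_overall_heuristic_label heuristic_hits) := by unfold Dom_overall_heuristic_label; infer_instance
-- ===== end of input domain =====

-- ===== PORT A =====
-- B changes: single fold keeping the max numeric priority rank instead of a cleaned list plus three any() scans (objective: alternative).
-- h.get('heuristic_label') on the association-list dict, truthiness = non-empty string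
def pvGetLabel (h : List (String × String)) : Option String :=
  (PySem.Dict.mk h).get? "heuristic_label"

def overall_heuristic_label (heuristic_hits : Option (List (List (String × String)))) : Option String :=
  let labels := (heuristic_hits.getD []).filterMap (fun h =>
    match pvGetLabel h with
    | some s => if s = "" then none else some s
    | none => none)
  let labels := labels.map PySem.Str.upper
  if labels.any (fun l => l == "CONTRADICTS") then some "CONTRADICTS"
  else if labels.any (fun l => l == "SUPPORTS") then some "SUPPORTS"
  else if labels ≠ [] then some "NEUTRAL"
  else none

-- ===== PORT B =====
-- ranks.get(l.upper(), 0)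
def pvRank (l : String) : Int :=
  if l = "CONTRADICTS" then 2 else if l = "SUPPORTS" then 1 else 0

def overall_heuristic_label_alt (heuristic_hits : Option (List (List (String × String)))) : Option String :=
  let best := (heuristic_hits.getD []).foldl (fun best h =>
    match pvGetLabel h with
    | some s => if s = "" then best else max best (pvRank (PySem.Str.upper s))
    | none => best) (-1 : Int)
  if best = 2 then some "CONTRADICTS"
  else if best = 1 then some "SUPPORTS"
  else if best = 0 then some "NEUTRAL"
  else none

-- ===== PRECONDITION & SPEC =====
def Spec_overall_heuristic_label (heuristic_hits : Option (List (List (String × String)))) (out : Option String) : Prop := out = overall_heuristic_label_alt heuristic_hits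
instance (heuristic_hits : Option (List (List (String × String)))) (out : Option String) : Decidable (Spec_overall_heuristic_label heuristic_hits out) := by unfold Spec_overall_heuristic_label; infer_instance

-- ===== CLAIM (what is proved, stated in full; the proofs are below) =====
def Claim_equal_overall_heuristic_label : Prop := ∀ (heuristic_hits : Option (List (List (String × String)))), Dom_overall_heuristic_label heuristic_hits → Spec_overall_heuristic_label heuristic_hits (overall_heuristic_label heuristic_hits)

-- ===== LEMMAS AND PROOFS =====
-- the cleaned, uppercased label list A builds
def pvLabels (hs : List (List (String × String))) : List String :=
  (hs.filterMap (fun h =>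
    match pvGetLabel h with
    | some s => if s = "" then none else some s
    | none => none)).map PySem.Str.upper

-- structural form of B's running maximum
def pvMaxRank : List String → Int
  | [] => -1
  | l :: t => max (pvRank l) (pvMaxRank t)

theorem foldl_eq_maxRank (hs : List (List (String × String))) (b : Int) (hb : -1 ≤ b) :
    hs.foldl (fun best h =>
      match pvGetLabel h with
      | some s => if s = "" then best else max best (pvRank (PySem.Str.upper s))
      | none => best) b = max b (pvMaxRank (pvLabels hs)) := by
  induction hs generalizing b with
  | nil =>
    simp only [List.foldl_nil, pvLabels, List.filterMap_nil, List.map_nil, pvMaxRank]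
    omega
  | cons h t ih =>
    simp only [List.foldl_cons]
    cases hg : pvGetLabel h with
    | none => simpa [pvLabels, hg] using ih b hb
    | some s =>
      by_cases hs0 : s = ""
      · simpa [pvLabels, hg, hs0] using ih b hb
      · simp only [if_neg hs0]
        rw [ih _ (le_trans hb (le_max_left b _))]
        simp [pvLabels, hg, hs0, pvMaxRank, max_assoc]

theorem maxRank_le (M : List String) : pvMaxRank M ≤ 2 := by
  induction M with
  | nil => simp [pvMaxRank]
  | cons l t ih =>
    simp only [pvMaxRank, max_le_iff]
    refine ⟨?_, ih⟩
    unfold pvRank; split_ifs <;> omega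

theorem maxRank_ge (M : List String) (h : M ≠ []) : 0 ≤ pvMaxRank M := by
  cases M with
  | nil => exact absurd rfl h
  | cons l t =>
    simp only [pvMaxRank, le_max_iff]
    left; unfold pvRank; split_ifs <;> omega

theorem maxRank_eq_two_iff (M : List String) :
    pvMaxRank M = 2 ↔ M.any (fun l => l == "CONTRADICTS") = true := by
  induction M with
  | nil => simp [pvMaxRank]
  | cons l t ih =>
    simp only [pvMaxRank, List.any_cons, Bool.or_eq_true, beq_iff_eq, ← ih]
    have h2 := maxRank_le t
    constructor
    · intro h
      rcases max_choice (pvRank l) (pvMaxRank t) with hc | hc <;> rw [hc] at h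
      · left; unfold pvRank at h; split_ifs at h <;> first | assumption | omega
      · right; exact h
    · rintro (h | h)
      · subst h
        have hr : pvRank "CONTRADICTS" = 2 := by decide
        omega
      · have : pvRank l ≤ 2 := by unfold pvRank; split_ifs <;> omega
        omega

theorem maxRank_ge_one_iff (M : List String) :
    1 ≤ pvMaxRank M ↔
      (M.any (fun l => l == "CONTRADICTS") = true ∨ M.any (fun l => l == "SUPPORTS") = true) := by
  induction M with
  | nil => simp [pvMaxRank]
  | cons l t ih =>
    simp only [pvMaxRank, le_max_iff, List.any_cons, Bool.or_eq_true, beq_iff_eq, ih]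
    constructor
    · rintro (h | h)
      · unfold pvRank at h
        split_ifs at h with h1 h2
        · exact Or.inl (Or.inl h1)
        · exact Or.inr (Or.inl h2)
        · omega
      · tauto
    · rintro ((h | h) | (h | h))
      · subst h
        have hr : pvRank "CONTRADICTS" = 2 := by decide
        omega
      · right; tauto
      · subst h
        have hr : pvRank "SUPPORTS" = 1 := by decide
        omega
      · right; tauto

theorem overall_heuristic_label_eq_alt (hh : Option (List (List (String × String)))) :
    overall_heuristic_label hh = overall_heuristic_label_alt hh := by
  unfold overall_heuristic_label overall_heuristic_label_alt
  rw [foldl_eq_maxRank _ _ (by omega)]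
  set M := pvLabels (hh.getD []) with hM
  show (if M.any (fun l => l == "CONTRADICTS") then some "CONTRADICTS"
        else if M.any (fun l => l == "SUPPORTS") then some "SUPPORTS"
        else if M ≠ [] then some "NEUTRAL" else none) = _
  have hle := maxRank_le M
  have h2 := maxRank_eq_two_iff M
  have h1 := maxRank_ge_one_iff M
  by_cases hc : M.any (fun l => l == "CONTRADICTS") = true
  · have : pvMaxRank M = 2 := h2.mpr hc
    simp [hc, this]
  · by_cases hsup : M.any (fun l => l == "SUPPORTS") = true
    · have hge : 1 ≤ pvMaxRank M := h1.mpr (Or.inr hsup)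
      have hne2 : pvMaxRank M ≠ 2 := fun h => hc (h2.mp h)
      have : pvMaxRank M = 1 := by omega
      simp [hc, hsup, this]
    · by_cases hne : M = []
      · simp [hne, pvMaxRank]
      · have hge : 0 ≤ pvMaxRank M := maxRank_ge M hne
        have hlt : ¬ 1 ≤ pvMaxRank M := fun h => by
          rcases h1.mp h with h | h <;> [exact hc h; exact hsup h]
        have : pvMaxRank M = 0 := by omega
        simp [hc, hsup, hne, this]

-- ===== VERDICT (by name: the statement is the Claim_ definition above) =====
theorem overall_heuristic_label_spec : Claim_equal_overall_heuristic_label := by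
  intro hh _
  unfold Spec_overall_heuristic_label
  exact overall_heuristic_label_eq_alt hh
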